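-- pv_equiv track=rewrite | github.com/degun-osint/BrainNotFound | app/routes/docs.py | get_nav_links
-- ===== SOURCE A (Python) =====
-- DOCS_STRUCTURE = [
--     {
--         'section': 'Démarrage',
--         'pages': [
--             {'slug': 'index', 'title': 'Introduction', 'icon': 'home'},
--             {'slug': 'getting-started', 'title': 'Premiers pas', 'icon': 'rocket'},
--         ]
--     },
--     {
--         'section': 'Guide utilisateur',
--         'pages': [
--             {'slug': 'quiz-syntax', 'title': 'Syntaxe des quiz', 'icon': 'page-edit'},
--             {'slug': 'admin-guide', 'title': 'Administration', 'icon': 'settings'},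
--             {'slug': 'groups-tenants', 'title': 'Groupes & Tenants', 'icon': 'building'},
--             {'slug': 'i18n', 'title': 'Langues (i18n)', 'icon': 'language'},
--         ]
--     },
--     {
--         'section': 'Technique',
--         'pages': [
--             {'slug': 'self-hosting', 'title': 'Auto-hébergement', 'icon': 'server'},
--             {'slug': 'configuration', 'title': 'Configuration', 'icon': 'tools'},
--             {'slug': 'api', 'title': 'API', 'icon': 'code'},
--         ]
--     },
-- ]
--
-- def get_nav_links(current_slug):
--     """Get previous and next page links for navigation."""
--     all_pages = []
--     for section in DOCS_STRUCTURE: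
--         all_pages.extend(section['pages'])
--
--     current_idx = None
--     for i, page in enumerate(all_pages):
--         if page['slug'] == current_slug:
--             current_idx = i
--             break
--
--     prev_page = all_pages[current_idx - 1] if current_idx and current_idx > 0 else None
--     next_page = all_pages[current_idx + 1] if current_idx is not None and current_idx < len(all_pages) - 1 else None
--
--     return prev_page, next_page
-- ===== SOURCE B (Python) =====
-- DOCS_STRUCTURE = [
--     {
--         'section': 'Démarrage',
--         'pages': [
--             {'slug': 'index', 'title': 'Introduction', 'icon': 'home'},
--             {'slug': 'getting-started', 'title': 'Premiers pas', 'icon': 'rocket'},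
--         ]
--     },
--     {
--         'section': 'Guide utilisateur',
--         'pages': [
--             {'slug': 'quiz-syntax', 'title': 'Syntaxe des quiz', 'icon': 'page-edit'},
--             {'slug': 'admin-guide', 'title': 'Administration', 'icon': 'settings'},
--             {'slug': 'groups-tenants', 'title': 'Groupes & Tenants', 'icon': 'building'},
--             {'slug': 'i18n', 'title': 'Langues (i18n)', 'icon': 'language'},
--         ]
--     },
--     {
--         'section': 'Technique',
--         'pages': [
--             {'slug': 'self-hosting', 'title': 'Auto-hébergement', 'icon': 'server'},
--             {'slug': 'configuration', 'title': 'Configuration', 'icon': 'tools'},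
--             {'slug': 'api', 'title': 'API', 'icon': 'code'},
--         ]
--     },
-- ]
--
-- def get_nav_links(current_slug):
--     """Get previous and next page links for navigation (single pass, no index arithmetic)."""
--     prev_page = None
--     found = False
--     for section in DOCS_STRUCTURE:
--         for page in section['pages']:
--             if found:
--                 return prev_page, page
--             if page['slug'] == current_slug:
--                 found = True
--             else:
--                 prev_page = page
--     if found:
--         return prev_page, None
--     return None, None
-- ===== Notes on version B (the rewrite author's own statement) =====
-- stated objective: simpler
-- what changed: Replaces the flatten-then-index approach (build all_pages, find current index by enumerate, compute neighbours with index arithmetic and bounds/truthiness guards) by a single pass over the sections that carries a running prev pointer and a found flag, returning (prev, page) as soon as the page after the match is seen.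
import Mathlib
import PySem

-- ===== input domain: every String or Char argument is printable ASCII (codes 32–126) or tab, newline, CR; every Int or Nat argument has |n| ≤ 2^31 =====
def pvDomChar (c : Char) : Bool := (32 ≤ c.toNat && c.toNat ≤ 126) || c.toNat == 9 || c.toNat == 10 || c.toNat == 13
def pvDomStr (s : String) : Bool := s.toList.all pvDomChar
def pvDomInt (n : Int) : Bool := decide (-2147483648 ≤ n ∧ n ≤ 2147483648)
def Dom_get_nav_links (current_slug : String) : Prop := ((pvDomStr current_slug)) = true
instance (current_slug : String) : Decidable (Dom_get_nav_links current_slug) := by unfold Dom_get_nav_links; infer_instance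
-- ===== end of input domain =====

-- B replaces the flatten + index-arithmetic neighbour lookup by one pass that carries a
-- running `prev` pointer and a found flag (objective: simpler).

-- Shared module constant DOCS_STRUCTURE: each section is (name, pages); each page dict is an
-- association list [("slug",…),("title",…),("icon",…)].
def pvDocs : List (String × List (List (String × String))) :=
  [ ("Démarrage",
      [ [("slug","index"),("title","Introduction"),("icon","home")],
        [("slug","getting-started"),("title","Premiers pas"),("icon","rocket")] ]),
    ("Guide utilisateur",
      [ [("slug","quiz-syntax"),("title","Syntaxe des quiz"),("icon","page-edit")],
        [("slug","admin-guide"),("title","Administration"),("icon","settings")],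
        [("slug","groups-tenants"),("title","Groupes & Tenants"),("icon","building")],
        [("slug","i18n"),("title","Langues (i18n)"),("icon","language")] ]),
    ("Technique",
      [ [("slug","self-hosting"),("title","Auto-hébergement"),("icon","server")],
        [("slug","configuration"),("title","Configuration"),("icon","tools")],
        [("slug","api"),("title","API"),("icon","code")] ]) ]

-- ===== PORT A =====
-- `for i, page in enumerate(all_pages): if page['slug'] == current_slug: current_idx = i; break`
def pvFindIdx (slug : String) : List (List (String × String)) → Nat → Option Nat
  | [], _ => none
  | page :: rest, i =>
      if (PySem.Dict.mk page).get? "slug" == some slug then some i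
      else pvFindIdx slug rest (i + 1)

def get_nav_links (current_slug : String) : (Option (List (String × String))) × (Option (List (String × String))) :=
  -- all_pages = []; for section in DOCS_STRUCTURE: all_pages.extend(section['pages'])
  let all_pages := pvDocs.foldl (fun acc sec => acc ++ sec.2) []
  let current_idx := pvFindIdx current_slug all_pages 0
  -- `if current_idx and current_idx > 0`: int-truthiness of `current_idx` coincides with i > 0
  let prev_page := match current_idx with
    | some i => if 0 < i then PySem.List.pyGet? all_pages ((i : Int) - 1) else none
    | none => none
  let next_page := match current_idx with
    | some i => if (i : Int) < PySem.List.len all_pages - 1 then PySem.List.pyGet? all_pages ((i : Int) + 1) else none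
    | none => none
  (prev_page, next_page)

-- ===== PORT B =====
-- inner loop over one section's pages; returns (early result, (prev, found))
def pvScanPages (slug : String) :
    List (List (String × String)) → Option (List (String × String)) → Bool →
    Option ((Option (List (String × String))) × (Option (List (String × String)))) ×
      (Option (List (String × String)) × Bool)
  | [], prev, found => (none, (prev, found))
  | page :: rest, prev, found =>
      if found then (some (prev, some page), (prev, found))
      else if (PySem.Dict.mk page).get? "slug" == some slug then
        pvScanPages slug rest prev true
      else
        pvScanPages slug rest (some page) false

-- outer loop over sections
def pvScanSections (slug : String) :
    List (String × List (List (String × String))) → Option (List (String × String)) → Bool →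
    Option ((Option (List (String × String))) × (Option (List (String × String)))) ×
      (Option (List (String × String)) × Bool)
  | [], prev, found => (none, (prev, found))
  | sec :: rest, prev, found =>
      match pvScanPages slug sec.2 prev found with
      | (some r, st) => (some r, st)
      | (none, (prev', found')) => pvScanSections slug rest prev' found'

def get_nav_links_alt (current_slug : String) : (Option (List (String × String))) × (Option (List (String × String))) :=
  match pvScanSections current_slug pvDocs none false with
  | (some r, _) => r
  | (none, (prev, found)) => if found then (prev, none) else (none, none)

-- ===== PRECONDITION & SPEC =====
def Spec_get_nav_links (current_slug : String) (out : (Option (List (String × String))) × (Option (List (String × String)))) : Prop := out = get_nav_links_alt current_slug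
instance (current_slug : String) (out : (Option (List (String × String))) × (Option (List (String × String)))) : Decidable (Spec_get_nav_links current_slug out) := by unfold Spec_get_nav_links; infer_instance

-- ===== CLAIM (what is proved, stated in full; the proofs are below) =====
def Claim_equal_get_nav_links : Prop := ∀ (current_slug : String), Dom_get_nav_links current_slug → Spec_get_nav_links current_slug (get_nav_links current_slug)

-- ===== LEMMAS AND PROOFS =====

-- ===== VERDICT (by name: the statement is the Claim_ definition above) =====
theorem get_nav_links_spec : Claim_equal_get_nav_links := by
  intro s _
  unfold Spec_get_nav_links
  by_cases h1 : s = "index"; · subst h1; decide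
  by_cases h2 : s = "getting-started"; · subst h2; decide
  by_cases h3 : s = "quiz-syntax"; · subst h3; decide
  by_cases h4 : s = "admin-guide"; · subst h4; decide
  by_cases h5 : s = "groups-tenants"; · subst h5; decide
  by_cases h6 : s = "i18n"; · subst h6; decide
  by_cases h7 : s = "self-hosting"; · subst h7; decide
  by_cases h8 : s = "configuration"; · subst h8; decide
  by_cases h9 : s = "api"; · subst h9; decide
  simp [get_nav_links, get_nav_links_alt, pvDocs, pvFindIdx, pvScanSections, pvScanPages, PySem.Dict.get?_mk_cons,
    Ne.symm h1, Ne.symm h2, Ne.symm h3, Ne.symm h4, Ne.symm h5,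
    Ne.symm h6, Ne.symm h7, Ne.symm h8, Ne.symm h9]
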